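-- pv_equiv track=rewrite | github.com/JavaZeroo/DLI-BSc-Mathematics-Documents | y3s1/人工智能的数学/code/1/20203293012_exercise_1.py | comput_a
-- ===== SOURCE A (Python) =====
-- def comput_a(a, n):
--     assert n > 0
--     ret = 0
--     for i in range(n):
--         next = 0
--         for j in range(i+1):
--             next += a * 10**j
--         ret += next
--     return ret
-- ===== SOURCE B (Python) =====
-- def comput_a(a, n):
--     # one pass: maintain the repunit 1, 11, 111, ... incrementally
--     assert n > 0
--     rep = 0
--     total = 0
--     for _ in range(n):
--         rep = rep * 10 + 1
--         total += a * rep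
--     return total
-- ===== Notes on version B (the rewrite author's own statement) =====
-- stated objective: faster
-- what changed: Replaces the nested loop (recomputing the inner geometric sum from scratch for each i) with a single pass that maintains the repunit 1,11,111,... incrementally via rep = rep*10 + 1.
import Mathlib
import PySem

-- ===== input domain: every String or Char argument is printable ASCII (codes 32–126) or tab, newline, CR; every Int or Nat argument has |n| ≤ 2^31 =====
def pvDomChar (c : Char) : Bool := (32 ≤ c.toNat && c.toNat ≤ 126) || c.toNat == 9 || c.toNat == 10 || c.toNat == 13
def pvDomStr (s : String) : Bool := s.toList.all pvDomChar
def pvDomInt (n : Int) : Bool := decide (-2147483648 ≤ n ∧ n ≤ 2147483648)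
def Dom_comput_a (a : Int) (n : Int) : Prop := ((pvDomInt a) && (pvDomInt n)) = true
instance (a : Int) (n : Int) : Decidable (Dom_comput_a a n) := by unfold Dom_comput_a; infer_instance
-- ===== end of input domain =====

-- B replaces A's nested loop by a single pass maintaining the repunit incrementally (O(n) vs O(n^2)).

-- ===== PORT A =====
def comput_a (a : Int) (n : Int) : Int :=
  (PySem.List.pyRange 0 n 1).foldl (fun ret i =>
    ret + (PySem.List.pyRange 0 (i + 1) 1).foldl (fun next j => next + a * 10 ^ j.toNat) 0) 0

-- ===== PORT B =====
def comput_a_alt (a : Int) (n : Int) : Int :=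
  ((PySem.List.pyRange 0 n 1).foldl (fun (st : Int × Int) _ =>
    (st.1 * 10 + 1, st.2 + a * (st.1 * 10 + 1))) (0, 0)).2

-- ===== PRECONDITION & SPEC =====
-- Pre_ excludes exactly the inputs with n ≤ 0, on which A's 'assert n > 0' raises AssertionError.
def Pre_comput_a (a : Int) (n : Int) : Prop := 0 < n
instance (a : Int) (n : Int) : Decidable (Pre_comput_a a n) := by unfold Pre_comput_a; infer_instance
def pvWitness_comput_a : Int × Int := (3, 4)

def Spec_comput_a (a : Int) (n : Int) (out : Int) : Prop := out = comput_a_alt a n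
instance (a : Int) (n : Int) (out : Int) : Decidable (Spec_comput_a a n out) := by unfold Spec_comput_a; infer_instance

-- ===== CLAIM (what is proved, stated in full; the proofs are below) =====
def Claim_equal_comput_a : Prop := ∀ (a : Int) (n : Int), Dom_comput_a a n → Pre_comput_a a n → Spec_comput_a a n (comput_a a n)

-- ===== LEMMAS AND PROOFS =====

-- repunit R m = 0, 1, 11, 111, …
def pvRep : Nat → Int
  | 0 => 0
  | m + 1 => pvRep m * 10 + 1

theorem pvRep_succ (m : Nat) : pvRep (m + 1) = pvRep m + 10 ^ m := by
  induction m with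
  | zero => simp [pvRep]
  | succ k ih =>
      show pvRep (k + 1) * 10 + 1 = pvRep k * 10 + 1 + 10 ^ (k + 1)
      rw [ih]; ring

-- A's inner loop computes a * repunit
theorem pv_inner (a : Int) (init : Int) : ∀ (m : Nat),
    (PySem.List.pyRange 0 (m : Int) 1).foldl (fun next j => next + a * 10 ^ j.toNat) init
      = init + a * pvRep m := by
  intro m
  induction m generalizing init with
  | zero => simp [pvRep]
  | succ k ih =>
      have h : (PySem.List.pyRange 0 ((k : Int) + 1) 1)
          = PySem.List.pyRange 0 (k : Int) 1 ++ [(k : Int)] :=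
        PySem.List.pyRange_one_succ_right (by exact_mod_cast Nat.zero_le k)
      push_cast
      rw [h, List.foldl_append, ih]
      simp [pvRep_succ, Int.toNat_natCast]
      ring

-- both outer folds, in lockstep
theorem pv_main (a : Int) : ∀ (m : Nat),
    ((PySem.List.pyRange 0 (m : Int) 1).foldl (fun (st : Int × Int) _ =>
        (st.1 * 10 + 1, st.2 + a * (st.1 * 10 + 1))) (0, 0))
      = (pvRep m,
         (PySem.List.pyRange 0 (m : Int) 1).foldl (fun ret i =>
           ret + (PySem.List.pyRange 0 (i + 1) 1).foldl
             (fun next j => next + a * 10 ^ j.toNat) 0) 0) := by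
  intro m
  induction m with
  | zero => simp [pvRep]
  | succ k ih =>
      have h : (PySem.List.pyRange 0 ((k : Int) + 1) 1)
          = PySem.List.pyRange 0 (k : Int) 1 ++ [(k : Int)] :=
        PySem.List.pyRange_one_succ_right (by exact_mod_cast Nat.zero_le k)
      push_cast
      rw [h, List.foldl_append, List.foldl_append, ih]
      have hinner : (PySem.List.pyRange 0 ((k : Int) + 1) 1).foldl
          (fun next j => next + a * 10 ^ j.toNat) 0 = a * pvRep (k + 1) := by
        have := pv_inner a 0 (k + 1)
        push_cast at this
        rw [this]; ring
      simp [hinner, pvRep]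

-- ===== VERDICT (by name: the statement is the Claim_ definition above) =====
theorem comput_a_spec : Claim_equal_comput_a := by
  intro a n _ hn
  unfold Spec_comput_a comput_a comput_a_alt
  have hn' : ((n.toNat : Int)) = n := Int.toNat_of_nonneg (le_of_lt hn)
  rw [← hn', pv_main a n.toNat]
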